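-- pv_equiv track=rewrite | github.com/4vish/x-verba | packages/pythonx_verba/scanner/packages/python/x_verba/scanner/engine.py | _has_guard_before
-- ===== SOURCE A (Python) =====
-- def _has_guard_before(lines: list, line_num: int, window: int = 15) -> bool:
--     """
--     Check for a genuine governance checkpoint in the N lines before a call.
--     Must be an actual conditional check, not just any if statement.
--     """
--     guard_patterns = [
--         # Validation checks
--         "validate_", "is_valid", "check_", "verify_", "sanitize", "sanitise",
--         "allowed_", "permitted_", "authorized", "authorised", "authenticated",
--         # Guard clauses that block
--         "raise ", "return safe", "return error", "return None",
--         "throw new", "throw Error",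
--         # Explicit governance patterns
--         "pre_node", "invariant", "governance", "eligibility",
--         "allow_list", "allowlist", "whitelist", "blocklist", "blacklist",
--         # VERBA-style patterns
--         "if not allowed", "if not valid", "if not auth",
--     ]
--
--     search_lines = lines[max(0, line_num-window):line_num-1]
--     for line in search_lines:
--         line_lower = line.lower().strip()
--         # Skip blank lines and comments
--         if not line_lower or line_lower.startswith("#") or line_lower.startswith("//"):
--             continue
--         for pattern in guard_patterns:
--             if pattern in line_lower:
--                 return True
--     return False
-- ===== SOURCE B (Python) =====
-- GUARD_PATTERNS = [
--     # Validation checks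
--     "validate_", "is_valid", "check_", "verify_", "sanitize", "sanitise",
--     "allowed_", "permitted_", "authorized", "authorised", "authenticated",
--     # Guard clauses that block
--     "raise ", "return safe", "return error", "return None",
--     "throw new", "throw Error",
--     # Explicit governance patterns
--     "pre_node", "invariant", "governance", "eligibility",
--     "allow_list", "allowlist", "whitelist", "blocklist", "blacklist",
--     # VERBA-style patterns
--     "if not allowed", "if not valid", "if not auth",
-- ]
--
-- # First-character dispatch table: maps a character to the patterns starting with it,
-- # so matching is anchored per position instead of one substring scan per pattern.
-- BY_FIRST = {}
-- for _p in GUARD_PATTERNS: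
--     BY_FIRST.setdefault(_p[0], []).append(_p)
--
--
-- def _has_guard_before(lines: list, line_num: int, window: int = 15) -> bool:
--     for line in lines[max(0, line_num - window):line_num - 1]:
--         cl = line.lower().strip()
--         if not cl or cl.startswith("#") or cl.startswith("//"):
--             continue
--         # anchored scan: at each position, try only the patterns whose first
--         # character is the character at that position
--         if any(cl.startswith(p, i)
--                for i, ch in enumerate(cl)
--                for p in BY_FIRST.get(ch, [])):
--             return True
--     return False
-- ===== Notes on version B (the rewrite author's own statement) =====
-- stated objective: alternative
-- what changed: B precomputes a first-character dispatch table mapping each character to the patterns starting with it, then does an anchored per-position scan of each kept line (cl.startswith(p, i) only for candidate patterns), instead of A's inner loop running a full substring search per pattern.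
import Mathlib
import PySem

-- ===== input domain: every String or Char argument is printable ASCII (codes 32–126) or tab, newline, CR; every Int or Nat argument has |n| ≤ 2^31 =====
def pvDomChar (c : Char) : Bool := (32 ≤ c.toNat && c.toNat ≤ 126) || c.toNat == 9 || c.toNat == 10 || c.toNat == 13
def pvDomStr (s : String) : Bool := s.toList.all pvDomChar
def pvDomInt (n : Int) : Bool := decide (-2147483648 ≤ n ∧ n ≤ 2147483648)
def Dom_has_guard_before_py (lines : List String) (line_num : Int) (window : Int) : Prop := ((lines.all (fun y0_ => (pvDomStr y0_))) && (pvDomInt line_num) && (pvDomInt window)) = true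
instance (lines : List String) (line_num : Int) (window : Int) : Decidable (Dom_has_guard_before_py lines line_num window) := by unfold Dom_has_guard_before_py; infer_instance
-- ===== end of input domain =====

-- B replaces A's per-pattern substring scans with a first-character dispatch table and an anchored per-position startswith scan (alternative algorithm, same result).


-- the guard_patterns list (identical literal in both Pythons)
def pvGuardPatterns : List String := [
  "validate_", "is_valid", "check_", "verify_", "sanitize", "sanitise",
  "allowed_", "permitted_", "authorized", "authorised", "authenticated",
  "raise ", "return safe", "return error", "return None",
  "throw new", "throw Error",
  "pre_node", "invariant", "governance", "eligibility",
  "allow_list", "allowlist", "whitelist", "blocklist", "blacklist",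
  "if not allowed", "if not valid", "if not auth"]

-- ===== PORT A =====
-- A's line-major loop with early return: skip blank/comment lines, else inner scan over patterns.
def pvALoop (search : List String) : Bool :=
  match search with
  | [] => false
  | l :: rest =>
    let ll := PySem.Str.strip (PySem.Str.lower l)
    if ll.toList.isEmpty || PySem.Str.startswith ll "#" || PySem.Str.startswith ll "//" then
      pvALoop rest
    else if pvGuardPatterns.any (fun p => PySem.Str.isIn p ll) then true
    else pvALoop rest

def has_guard_before_py (lines : List String) (line_num : Int) (window : Int) : Bool :=
  pvALoop (PySem.List.slice lines (some (max 0 (line_num - window))) (some (line_num - 1)))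

-- ===== PORT B =====
-- BY_FIRST: built by the module-level loop 'BY_FIRST.setdefault(p[0], []).append(p)'
-- (p[0] = Str.pyGet? p 0; the none branch is Python's IndexError, never reached: no pattern is empty)
def pvByFirst : PySem.Dict Char (List String) :=
  pvGuardPatterns.foldl (fun d p =>
    match PySem.Str.pyGet? p 0 with
    | some c => PySem.Dict.insert d c (PySem.Dict.getD d c [] ++ [p])
    | none => d) PySem.Dict.empty

-- the inner any(...) generator: anchored scan over positions with first-char dispatch;
-- cl.startswith(p, i) with i ≥ 0 (from enumerate) is exactly startswith on cl[i:] = drop i.toNat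
def pvLineMatch (cl : List Char) : Bool :=
  (PySem.List.enumerate cl).any (fun ic =>
    (PySem.Dict.getD pvByFirst ic.2 []).any (fun p =>
      PySem.Chars.startswith (cl.drop ic.1.toNat) p.toList))

def pvBLoop (search : List String) : Bool :=
  match search with
  | [] => false
  | l :: rest =>
    let cl := PySem.Str.strip (PySem.Str.lower l)
    if cl.toList.isEmpty || PySem.Str.startswith cl "#" || PySem.Str.startswith cl "//" then
      pvBLoop rest
    else if pvLineMatch cl.toList then true
    else pvBLoop rest

def has_guard_before_py_alt (lines : List String) (line_num : Int) (window : Int) : Bool :=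
  pvBLoop (PySem.List.slice lines (some (max 0 (line_num - window))) (some (line_num - 1)))

-- ===== PRECONDITION & SPEC =====
def Spec_has_guard_before_py (lines : List String) (line_num : Int) (window : Int) (out : Bool) : Prop := out = has_guard_before_py_alt lines line_num window
instance (lines : List String) (line_num : Int) (window : Int) (out : Bool) : Decidable (Spec_has_guard_before_py lines line_num window out) := by unfold Spec_has_guard_before_py; infer_instance

-- ===== CLAIM (what is proved, stated in full; the proofs are below) =====
def Claim_equal_has_guard_before_py : Prop := ∀ (lines : List String) (line_num : Int) (window : Int), Dom_has_guard_before_py lines line_num window → Spec_has_guard_before_py lines line_num window (has_guard_before_py lines line_num window)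

-- ===== LEMMAS AND PROOFS =====

-- every value stored under a key present in the table is a guard pattern (finite check on the literal table)
theorem pvByFirst_values_sub :
    (pvByFirst.keys).all (fun c => (PySem.Dict.getD pvByFirst c []).all
      (fun p => decide (p ∈ pvGuardPatterns))) = true := by decide

-- every guard pattern is nonempty and stored in the table under its first character (finite check)
theorem pvByFirst_complete :
    pvGuardPatterns.all (fun p => match p.toList.head? with
      | some c => (PySem.Dict.getD pvByFirst c []).contains p
      | none => false) = true := by decide

theorem mem_getD_pvByFirst {c : Char} {p : String}
    (h : p ∈ PySem.Dict.getD pvByFirst c []) : p ∈ pvGuardPatterns := by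
  by_cases hc : pvByFirst.contains c = true
  · have hk : c ∈ pvByFirst.keys := (PySem.Dict.contains_iff_mem_keys _ _).mp hc
    have := (List.all_eq_true.mp pvByFirst_values_sub) c hk
    have := (List.all_eq_true.mp this) p h
    exact of_decide_eq_true this
  · have hnone : pvByFirst.get? c = none :=
      (PySem.Dict.get?_eq_none_iff_contains _ _).mpr (by simpa using hc)
    simp [PySem.Dict.getD, hnone] at h

-- the anchored dispatch scan of a line decides exactly "some guard pattern occurs in the line"
theorem pvLineMatch_eq (cl : List Char) :
    pvLineMatch cl = pvGuardPatterns.any (fun p => PySem.Chars.isIn p.toList cl) := by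
  apply Bool.eq_iff_iff.mpr
  simp only [pvLineMatch, List.any_eq_true]
  constructor
  · rintro ⟨ic, hmem, p, hp, hsw⟩
    refine ⟨p, mem_getD_pvByFirst hp, ?_⟩
    exact (PySem.Chars.exists_prefix_drop_iff_isIn _ _).mp
      ⟨ic.1.toNat, (PySem.Chars.startswith_iff _ _).mp hsw⟩
  · rintro ⟨p, hp, hIn⟩
    obtain ⟨j, hpre⟩ := (PySem.Chars.exists_prefix_drop_iff_isIn _ _).mpr hIn
    have hcomp := (List.all_eq_true.mp pvByFirst_complete) p hp
    cases hhd : p.toList.head? with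
    | none => rw [hhd] at hcomp; exact absurd hcomp (by simp)
    | some c =>
      rw [hhd] at hcomp
      -- the first char of p is at position j of cl
      have hdj : (cl.drop j).head? = some c := by
        obtain ⟨t, ht⟩ := hpre
        rw [← ht]
        cases hp' : p.toList with
        | nil => rw [hp'] at hhd; simp at hhd
        | cons a as => rw [hp'] at hhd; simp at hhd ⊢; simpa using hhd
      have hj : cl[j]? = some c := by rw [← List.head?_drop]; exact hdj
      have hjlt : j < cl.length := by
        by_contra hge
        rw [List.getElem?_eq_none (by omega)] at hj; simp at hj
      refine ⟨((j : Int), c), ?_, p, ?_, ?_⟩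
      · exact (PySem.List.mem_enumerate_iff _ _ _).mpr
          ⟨j, hjlt, by simp [List.getElem?_eq_getElem hjlt] at hj; simp [hj]⟩
      · simpa using hcomp
      · exact (PySem.Chars.startswith_iff _ _).mpr (by simpa using hpre)

-- the two early-return loops agree line by line
theorem pvBLoop_eq_pvALoop (xs : List String) : pvALoop xs = pvBLoop xs := by
  induction xs with
  | nil => rfl
  | cons l rest ih =>
    simp only [pvALoop, pvBLoop]
    set c := PySem.Str.strip (PySem.Str.lower l) with hc
    have hmatch : pvLineMatch c.toList = pvGuardPatterns.any (fun p => PySem.Str.isIn p c) := by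
      rw [pvLineMatch_eq]; simp [PySem.Str.isIn_eq]
    rw [← hmatch]
    by_cases h : (c.toList.isEmpty || PySem.Str.startswith c "#" || PySem.Str.startswith c "//") = true
    · rw [if_pos h, if_pos h]; exact ih
    · rw [if_neg h, if_neg h]
      cases hm : pvLineMatch c.toList with
      | true => rfl
      | false => simpa using ih

-- ===== VERDICT =====
theorem has_guard_before_py_spec : Claim_equal_has_guard_before_py := by
  intro lines line_num window _
  unfold Spec_has_guard_before_py has_guard_before_py has_guard_before_py_alt
  exact pvBLoop_eq_pvALoop _
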